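-- pv_equiv track=rewrite | github.com/omarovski-27/expense_iq | backend/services/telegram_service.py | find_category_id
-- ===== SOURCE A (Python) =====
-- def find_category_id(text: str, categories: list[dict]):
--     if not categories:
--         raise ValueError("No categories available")
--
--     text_lower = text.lower()
--     for category in categories:
--         name = category["name"].lower()
--         if text_lower in name or name in text_lower:
--             return category["id"], category["name"]
--
--     for category in categories:
--         if category["name"].lower() == "other":
--             return category["id"], "Other"
--
--     return categories[0]["id"], categories[0]["name"]
-- ===== SOURCE B (Python) =====
-- def find_category_id(text: str, categories: list[dict]):
--     # Single pass: match check and first-"other" recording fused into one loop.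
--     if not categories:
--         raise ValueError("No categories available")
--     text_lower = text.lower()
--     other_id = None
--     for category in categories:
--         name_lower = category["name"].lower()
--         if text_lower in name_lower or name_lower in text_lower:
--             return category["id"], category["name"]
--         if other_id is None and name_lower == "other":
--             other_id = category["id"]
--     if other_id is not None:
--         return other_id, "Other"
--     return categories[0]["id"], categories[0]["name"]
-- ===== Notes on version B (the rewrite author's own statement) =====
-- stated objective: alternative
-- what changed: B fuses A's two sequential scans (substring match, then a second full scan for an 'other' fallback) into one pass that records the first 'other' candidate while matching, so the list is traversed once instead of up to twice.
import Mathlib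
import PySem

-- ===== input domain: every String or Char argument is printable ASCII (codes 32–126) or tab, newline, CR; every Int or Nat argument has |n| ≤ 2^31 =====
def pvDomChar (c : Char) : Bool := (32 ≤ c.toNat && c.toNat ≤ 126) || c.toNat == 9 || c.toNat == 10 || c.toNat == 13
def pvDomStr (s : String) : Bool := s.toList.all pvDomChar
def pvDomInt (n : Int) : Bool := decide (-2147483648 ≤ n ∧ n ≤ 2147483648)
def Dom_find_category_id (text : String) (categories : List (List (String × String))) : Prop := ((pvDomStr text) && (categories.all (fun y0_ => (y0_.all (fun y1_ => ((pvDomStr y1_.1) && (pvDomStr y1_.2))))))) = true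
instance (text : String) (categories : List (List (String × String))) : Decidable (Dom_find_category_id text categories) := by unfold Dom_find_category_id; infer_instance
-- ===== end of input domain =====

-- B fuses A's two sequential scans into one pass; same return value on Pre_.

-- ===== PORT A =====
-- first loop: substring match either way round
def fcidA_loop1 (tl : List Char) : List (List (String × String)) → Option (String × String)
  | [] => none
  | c :: rest =>
    let name := PySem.Chars.lower (PySem.Dict.getD ⟨c⟩ "name" "").toList
    if PySem.Chars.isIn tl name || PySem.Chars.isIn name tl then
      some (PySem.Dict.getD ⟨c⟩ "id" "", PySem.Dict.getD ⟨c⟩ "name" "")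
    else fcidA_loop1 tl rest

-- second loop: first category whose lowered name is "other"
def fcidA_loop2 : List (List (String × String)) → Option (String × String)
  | [] => none
  | c :: rest =>
    if PySem.Chars.lower (PySem.Dict.getD ⟨c⟩ "name" "").toList = "other".toList then
      some (PySem.Dict.getD ⟨c⟩ "id" "", "Other")
    else fcidA_loop2 rest

def find_category_id (text : String) (categories : List (List (String × String))) : String × String :=
  match categories with
  | [] => ("", "")   -- Python raises ValueError here; excluded by Pre_
  | c0 :: _ =>
    let tl := (PySem.Str.lower text).toList
    match fcidA_loop1 tl categories with
    | some r => r
    | none =>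
      match fcidA_loop2 categories with
      | some r => r
      | none => (PySem.Dict.getD ⟨c0⟩ "id" "", PySem.Dict.getD ⟨c0⟩ "name" "")

-- ===== PORT B =====
-- single pass, carrying the first recorded "other" id
def fcidB_loop (tl : List Char) (c0 : List (String × String)) (other : Option String) :
    List (List (String × String)) → String × String
  | [] =>
    match other with
    | some oid => (oid, "Other")
    | none => (PySem.Dict.getD ⟨c0⟩ "id" "", PySem.Dict.getD ⟨c0⟩ "name" "")
  | c :: rest =>
    let nl := PySem.Chars.lower (PySem.Dict.getD ⟨c⟩ "name" "").toList
    if PySem.Chars.isIn tl nl || PySem.Chars.isIn nl tl then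
      (PySem.Dict.getD ⟨c⟩ "id" "", PySem.Dict.getD ⟨c⟩ "name" "")
    else
      fcidB_loop tl c0
        (if other.isNone ∧ nl = "other".toList then some (PySem.Dict.getD ⟨c⟩ "id" "") else other)
        rest

def find_category_id_alt (text : String) (categories : List (List (String × String))) : String × String :=
  match categories with
  | [] => ("", "")   -- Python raises ValueError here; excluded by Pre_
  | c0 :: _ => fcidB_loop ((PySem.Str.lower text).toList) c0 none categories

-- ===== PRECONDITION & SPEC =====
-- helpers for Pre_ (plain Bool tests on one category / the text)
def fcidHasName (c : List (String × String)) : Bool := PySem.Dict.contains ⟨c⟩ "name"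
def fcidHasId (c : List (String × String)) : Bool := PySem.Dict.contains ⟨c⟩ "id"
def fcidM (text : String) (c : List (String × String)) : Bool :=
  let tl := (PySem.Str.lower text).toList
  let nl := PySem.Chars.lower (PySem.Dict.getD ⟨c⟩ "name" "").toList
  PySem.Chars.isIn tl nl || PySem.Chars.isIn nl tl
def fcidOther (c : List (String × String)) : Bool :=
  PySem.Chars.lower (PySem.Dict.getD ⟨c⟩ "name" "").toList == "other".toList

-- Pre_ is exactly where the Python returns normally (no ValueError/KeyError): a
-- non-empty list, and every category the scan actually touches carries the key it
-- reads ("name" up to the first substring match, plus "id" on whichever category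
-- is returned).
def Pre_find_category_id (text : String) (categories : List (List (String × String))) : Prop :=
  categories ≠ [] ∧
  ((∃ k < categories.length,
      (∀ j < k, fcidHasName (categories.getD j []) = true ∧ fcidM text (categories.getD j []) = false) ∧
      fcidHasName (categories.getD k []) = true ∧ fcidM text (categories.getD k []) = true ∧
      fcidHasId (categories.getD k []) = true) ∨
   ((∀ c ∈ categories, fcidHasName c = true ∧ fcidM text c = false) ∧
    ((∃ k < categories.length,
        (∀ j < k, fcidOther (categories.getD j []) = false) ∧
        fcidOther (categories.getD k []) = true ∧ fcidHasId (categories.getD k []) = true) ∨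
     ((∀ c ∈ categories, fcidOther c = false) ∧ fcidHasId (categories.headD []) = true))))

instance (text : String) (categories : List (List (String × String))) : Decidable (Pre_find_category_id text categories) := by unfold Pre_find_category_id; infer_instance

def pvWitness_find_category_id : String × (List (List (String × String))) :=
  ("lunch food", [[("name", "Food"), ("id", "1")], [("name", "Other"), ("id", "9")]])

def Spec_find_category_id (text : String) (categories : List (List (String × String))) (out : String × String) : Prop := out = find_category_id_alt text categories
instance (text : String) (categories : List (List (String × String))) (out : String × String) : Decidable (Spec_find_category_id text categories out) := by unfold Spec_find_category_id; infer_instance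

-- ===== CLAIM (what is proved, stated in full; the proofs are below) =====
def Claim_equal_find_category_id : Prop := ∀ (text : String) (categories : List (List (String × String))), Dom_find_category_id text categories → Pre_find_category_id text categories → Spec_find_category_id text categories (find_category_id text categories)

-- ===== LEMMAS AND PROOFS =====

-- B's fused loop equals A's first scan with A's second scan (seeded by the carried
-- "other" candidate) as fallback.
theorem fcidB_loop_eq (tl : List Char) (c0 : List (String × String)) :
    ∀ (cats : List (List (String × String))) (other : Option String),
      fcidB_loop tl c0 other cats =
        ((fcidA_loop1 tl cats).getD
          (match other with
           | some oid => (oid, "Other")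
           | none =>
             (fcidA_loop2 cats).getD
               (PySem.Dict.getD ⟨c0⟩ "id" "", PySem.Dict.getD ⟨c0⟩ "name" ""))) := by
  intro cats
  induction cats with
  | nil => intro other; cases other <;> simp [fcidB_loop, fcidA_loop1, fcidA_loop2]
  | cons c rest ih =>
    intro other
    simp only [fcidB_loop, fcidA_loop1, fcidA_loop2]
    split
    · simp
    · rw [ih]
      cases other with
      | some oid => simp
      | none =>
        by_cases h : PySem.Chars.lower (PySem.Dict.getD ⟨c⟩ "name" "").toList = ['o','t','h','e','r']
        · simp [h]
        · simp [h]

-- ===== VERDICT (by name: the statement is the Claim_ definition above) =====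
theorem find_category_id_spec : Claim_equal_find_category_id := by
  intro text categories _ _
  unfold Spec_find_category_id
  cases categories with
  | nil => rfl
  | cons c0 rest =>
    simp only [find_category_id, find_category_id_alt]
    rw [fcidB_loop_eq]
    cases h1 : fcidA_loop1 ((PySem.Str.lower text).toList) (c0 :: rest) with
    | some r => simp
    | none =>
      cases h2 : fcidA_loop2 (c0 :: rest) with
      | some r => simp
      | none => simp
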